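-- pv_equiv track=rewrite | github.com/hunteresting/Grassfield | trapping_rain_2.py | check
-- ===== SOURCE A (Python) =====
-- def check (buildings, line):
--     full = 0
--     start = 0
--     finish = len(buildings) - 1
--
--     for block in buildings:
--         if block >= line:
--             start = buildings.index(block)
--             break
--
--     buildings.reverse()
--     for block in buildings:
--         if block >= line:
--             finish = buildings.index(block)
--             break
--
--     for block in buildings:
--         if block >= line:
--             full += 1
--
--     return len(buildings) - (finish + start) - full
-- ===== SOURCE B (Python) =====
-- def check(buildings, line):
--     first = 0
--     last = 0
--     count = 0
--     for i, b in enumerate(buildings):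
--         if b >= line:
--             if count == 0:
--                 first = i
--             last = i
--             count += 1
--     return last - first + 1 - count
-- ===== Notes on version B (the rewrite author's own statement) =====
-- stated objective: simpler
-- what changed: Replaces A's four traversals (two search loops with break plus list.index, an in-place reverse, and a counting loop) by a single enumerate pass tracking the first/last matching index and the match count; B also does not mutate the input list.
import Mathlib
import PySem

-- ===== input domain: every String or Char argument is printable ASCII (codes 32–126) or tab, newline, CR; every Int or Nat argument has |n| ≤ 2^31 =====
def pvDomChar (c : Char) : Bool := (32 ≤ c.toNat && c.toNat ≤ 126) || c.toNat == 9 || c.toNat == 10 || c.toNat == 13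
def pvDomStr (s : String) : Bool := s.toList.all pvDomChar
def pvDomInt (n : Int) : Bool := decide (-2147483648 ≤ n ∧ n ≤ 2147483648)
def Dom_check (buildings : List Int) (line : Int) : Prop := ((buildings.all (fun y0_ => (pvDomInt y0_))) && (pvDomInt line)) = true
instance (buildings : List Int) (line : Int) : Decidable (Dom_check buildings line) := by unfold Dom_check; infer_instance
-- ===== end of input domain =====

-- B replaces A's four traversals (with list.index and an in-place reverse) by one enumerate
-- pass tracking the first/last matching index and the match count; B does not mutate the
-- input list (A reverses `buildings` in place — the equivalence proved here is about the
-- return value only).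

-- ===== PORT A =====
-- 'for block in buildings: if block >= line: <idx> = buildings.index(block); break'
-- (the `none` branch of index? is unreachable: block was taken from the searched list)
def checkFindLoop (whole : List Int) (line : Int) (dflt : Int) : List Int → Int
  | [] => dflt
  | b :: rest =>
      if b ≥ line then
        match PySem.List.index? whole b with
        | some i => (i : Int)
        | none => dflt
      else checkFindLoop whole line dflt rest

def check (buildings : List Int) (line : Int) : Int :=
  let full : Int := 0
  let start : Int := checkFindLoop buildings line 0 buildings
  let rev := buildings.reverse                                   -- buildings.reverse() (in place)
  let finish : Int := checkFindLoop rev line ((buildings.length : Int) - 1) rev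
  let full := rev.foldl (fun acc b => if b ≥ line then acc + 1 else acc) full
  (rev.length : Int) - (finish + start) - full

-- ===== PORT B =====
def check_alt (buildings : List Int) (line : Int) : Int :=
  let st := (PySem.List.enumerate buildings 0).foldl
    (fun (s : Int × Int × Int) (ib : Int × Int) =>
      if ib.2 ≥ line then
        ((if s.2.2 == 0 then ib.1 else s.1), ib.1, s.2.2 + 1)
      else s)
    (0, 0, 0)
  st.2.1 - st.1 + 1 - st.2.2

-- ===== PRECONDITION & SPEC =====
def Spec_check (buildings : List Int) (line : Int) (out : Int) : Prop := out = check_alt buildings line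
instance (buildings : List Int) (line : Int) (out : Int) : Decidable (Spec_check buildings line out) := by unfold Spec_check; infer_instance

-- ===== CLAIM (what is proved, stated in full; the proofs are below) =====
def Claim_equal_check : Prop := ∀ (buildings : List Int) (line : Int), Dom_check buildings line → Spec_check buildings line (check buildings line)

-- ===== LEMMAS AND PROOFS =====

-- B's loop body, named for the proofs
def bStep (line : Int) (s : Int × Int × Int) (ib : Int × Int) : Int × Int × Int :=
  if ib.2 ≥ line then
    ((if s.2.2 == 0 then ib.1 else s.1), ib.1, s.2.2 + 1)
  else s

theorem bStep_eq (line : Int) : bStep line =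
    (fun (s : Int × Int × Int) (ib : Int × Int) =>
      if ib.2 ≥ line then
        ((if s.2.2 == 0 then ib.1 else s.1), ib.1, s.2.2 + 1)
      else s) := rfl

-- the `last` accumulator of B's loop, once a match was seen, in closed form
def lastAcc (line : Int) : List Int → Int → Int → Int
  | [], _, l0 => l0
  | b :: t, s, l0 => lastAcc line t (s + 1) (if line ≤ b then s else l0)

theorem lastAcc_const (line : Int) (l : List Int) (s : Int) (l0 : Int)
    (h : ∀ b ∈ l, ¬ line ≤ b) : lastAcc line l s l0 = l0 := by
  induction l generalizing s l0 with
  | nil => rfl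
  | cons b t ih =>
      simp only [lastAcc]
      rw [if_neg (h b (List.mem_cons_self ..))]
      exact ih _ _ (fun x hx => h x (List.mem_cons_of_mem _ hx))

theorem lastAcc_rev (line : Int) (l : List Int) (s : Int) (l0 : Int) :
    lastAcc line l s l0 =
      match l.reverse.findIdx? (fun b => decide (line ≤ b)) with
      | some k => s + (l.length : Int) - 1 - (k : Int)
      | none => l0 := by
  induction l generalizing s l0 with
  | nil => rfl
  | cons b t ih =>
      simp only [lastAcc, List.reverse_cons, List.findIdx?_append]
      rw [ih]
      cases hfi : t.reverse.findIdx? (fun b => decide (line ≤ b)) with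
      | some k =>
          simp only [Option.some_or, List.length_cons]
          push_cast
          ring
      | none =>
          simp only [Option.none_or, List.findIdx?_cons, List.findIdx?_nil]
          by_cases hb : line ≤ b
          · simp only [hb, decide_true, if_pos, Option.map_some,
              List.length_reverse, List.length_cons]
            push_cast
            ring
          · simp [hb]

-- B's loop skips elements below the line
theorem bfold_const (line : Int) (l : List Int) (s : Int) (st : Int × Int × Int)
    (h : ∀ b ∈ l, ¬ line ≤ b) :
    (PySem.List.enumerate l s).foldl (bStep line) st = st := by
  induction l generalizing s st with
  | nil => rfl
  | cons b t ih =>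
      rw [PySem.List.enumerate_cons]
      simp only [List.foldl_cons, bStep, ge_iff_le]
      rw [if_neg (h b (List.mem_cons_self ..))]
      exact ih _ _ (fun x hx => h x (List.mem_cons_of_mem _ hx))

-- once a match was seen (count > 0), B's loop keeps `first`, tracks `last` as lastAcc, and counts
theorem bfold_pos (line : Int) (l : List Int) (s f0 l0 c : Int) (hc : 0 < c) :
    (PySem.List.enumerate l s).foldl (bStep line) (f0, l0, c)
      = (f0, lastAcc line l s l0, c + (l.countP (fun b => decide (line ≤ b)) : Int)) := by
  induction l generalizing s l0 c with
  | nil => simp [lastAcc]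
  | cons b t ih =>
      rw [PySem.List.enumerate_cons]
      simp only [List.foldl_cons, bStep, ge_iff_le, lastAcc, List.countP_cons]
      have hcne : (c == 0) = false := by
        rw [beq_eq_false_iff_ne]
        omega
      by_cases hb : line ≤ b
      · rw [if_pos hb, if_pos hb, hcne]
        simp only [Bool.false_eq_true, if_false]
        rw [ih _ _ _ (by omega)]
        simp [hb]
        push_cast
        ring
      · rw [if_neg hb, if_neg hb]
        rw [ih _ _ _ hc]
        simp [hb]

-- A's search loop returns the index of the first element ≥ line (or the default)
theorem checkFindLoop_aux (line dflt : Int) (suf pre : List Int)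
    (hpre : ∀ b ∈ pre, ¬ line ≤ b) :
    checkFindLoop (pre ++ suf) line dflt suf
      = match (pre ++ suf).findIdx? (fun b => decide (line ≤ b)) with
        | some k => (k : Int)
        | none => dflt := by
  induction suf generalizing pre with
  | nil =>
      have : (pre ++ ([] : List Int)).findIdx? (fun b => decide (line ≤ b)) = none := by
        rw [List.findIdx?_eq_none_iff]
        intro x hx
        simp only [List.append_nil] at hx
        simpa using hpre x hx
      rw [this]
      rfl
  | cons b rest ih =>
      simp only [checkFindLoop]
      by_cases hb : line ≤ b
      · rw [if_pos hb]
        have hnotin : b ∉ pre := fun hmem => hpre b hmem hb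
        have hidx : PySem.List.index? (pre ++ b :: rest) b = some pre.length := by
          rw [PySem.List.index?_eq_some_iff]
          exact ⟨pre, rest, rfl, rfl, hnotin⟩
        have hfind : (pre ++ b :: rest).findIdx? (fun b => decide (line ≤ b)) = some pre.length := by
          rw [List.findIdx?_append]
          have h1 : pre.findIdx? (fun b => decide (line ≤ b)) = none := by
            rw [List.findIdx?_eq_none_iff]; intro x hx; simpa using hpre x hx
          rw [h1, List.findIdx?_cons]
          simp [hb]
        rw [hidx, hfind]
      · rw [if_neg hb]
        have hpre' : ∀ x ∈ pre ++ [b], ¬ line ≤ x := by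
          intro x hx
          rcases List.mem_append.mp hx with h | h
          · exact hpre x h
          · simp only [List.mem_singleton] at h; subst h; exact hb
        have := ih (pre ++ [b]) hpre'
        simpa using this

theorem checkFindLoop_char (line dflt : Int) (l : List Int) :
    checkFindLoop l line dflt l
      = match l.findIdx? (fun b => decide (line ≤ b)) with
        | some k => (k : Int)
        | none => dflt := by
  simpa using checkFindLoop_aux line dflt l [] (by simp)

-- when no building reaches the line, both return 1
def AllBelow_check (buildings : List Int) (line : Int) : Prop := ∀ b ∈ buildings, b < line

theorem check_of_D (buildings : List Int) (line : Int) (h : AllBelow_check buildings line) :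
    check buildings line = 1 := by
  simp only [check]
  have hall : ∀ b ∈ buildings, ¬ line ≤ b := fun b hb => by
    have := h b hb; omega
  have h1 : checkFindLoop buildings line 0 buildings = 0 := by
    rw [checkFindLoop_char]
    have : buildings.findIdx? (fun b => decide (line ≤ b)) = none := by
      rw [List.findIdx?_eq_none_iff]; intro x hx; simpa using hall x hx
    rw [this]
  have h2 : checkFindLoop buildings.reverse line ((buildings.length : Int) - 1) buildings.reverse
      = (buildings.length : Int) - 1 := by
    rw [checkFindLoop_char]
    have : buildings.reverse.findIdx? (fun b => decide (line ≤ b)) = none := by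
      rw [List.findIdx?_eq_none_iff]; intro x hx
      simpa using hall x (by simpa using hx)
    rw [this]
  have h3 : buildings.reverse.foldl (fun acc b => if b ≥ line then acc + 1 else acc) (0 : Int) = 0 := by
    rw [PySem.List.foldl_ite_add_one]
    have : buildings.reverse.countP (fun b => decide (line ≤ b)) = 0 := by
      rw [List.countP_eq_zero]; intro x hx; simpa using hall x (by simpa using hx)
    simp [this]
  rw [h1, h2, h3]
  simp

theorem check_alt_of_D (buildings : List Int) (line : Int) (h : AllBelow_check buildings line) :
    check_alt buildings line = 1 := by
  have hall : ∀ b ∈ buildings, ¬ line ≤ b := fun b hb => by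
    have := h b hb; omega
  have : (PySem.List.enumerate buildings 0).foldl (bStep line)
      ((0 : Int), (0 : Int), (0 : Int)) = (0, 0, 0) :=
    bfold_const line buildings 0 _ hall
  simp only [check_alt, ← bStep_eq, this]
  norm_num

-- the main case: some element is ≥ line
theorem check_eq_alt_of_not_D (buildings : List Int) (line : Int) (h : ¬ AllBelow_check buildings line) :
    check buildings line = check_alt buildings line := by
  have hex : ∃ b ∈ buildings, line ≤ b := by
    unfold AllBelow_check at h
    push_neg at h
    obtain ⟨b, hb, hle⟩ := h
    exact ⟨b, hb, by omega⟩
  obtain ⟨k, hfi⟩ : ∃ k, buildings.findIdx? (fun b => decide (line ≤ b)) = some k := by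
    rcases hcase : buildings.findIdx? (fun b => decide (line ≤ b)) with _ | k
    · exfalso
      obtain ⟨b, hb, hle⟩ := hex
      have := List.findIdx?_eq_none_iff.mp hcase b hb
      simp at this
      omega
    · exact ⟨k, rfl⟩
  obtain ⟨hk, hpk, hmin⟩ := List.findIdx?_eq_some_iff_getElem.mp hfi
  obtain ⟨pre, x, suf, hdec, hprelen, hpx, hprefail⟩ :
      ∃ pre x suf, buildings = pre ++ x :: suf ∧ pre.length = k ∧
        (line ≤ x) ∧ ∀ b ∈ pre, ¬ line ≤ b := by
    refine ⟨buildings.take k, buildings[k], buildings.drop (k+1), ?_, ?_, ?_, ?_⟩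
    · rw [List.getElem_cons_drop hk]
      exact (List.take_append_drop k buildings).symm
    · exact List.length_take_of_le (by omega)
    · simpa using hpk
    · intro b hb
      rw [List.mem_take_iff_getElem] at hb
      obtain ⟨i, hi, hbi⟩ := hb
      have := hmin i (by omega)
      rw [hbi] at this
      simpa using this
  subst hdec
  have hprecount : pre.countP (fun b => decide (line ≤ b)) = 0 := by
    rw [List.countP_eq_zero]
    intro b hb
    simpa using hprefail b hb
  have hstart : checkFindLoop (pre ++ x :: suf) line 0 (pre ++ x :: suf) = (k : Int) := by
    rw [checkFindLoop_char, hfi]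
  have hrev : (pre ++ x :: suf).reverse = suf.reverse ++ x :: pre.reverse := by simp
  have hfull : (pre ++ x :: suf).reverse.foldl
      (fun acc b => if b ≥ line then acc + 1 else acc) (0 : Int)
      = (((pre ++ x :: suf).countP (fun b => decide (line ≤ b)) : Int)) := by
    rw [PySem.List.foldl_ite_add_one]
    simp only [ge_iff_le, zero_add, List.countP_reverse]
  have hcount : (((pre ++ x :: suf).countP (fun b => decide (line ≤ b)) : Int))
      = 1 + ((suf.countP (fun b => decide (line ≤ b)) : Int)) := by
    rw [List.countP_append, List.countP_cons, hprecount]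
    simp [hpx]
    push_cast
    ring
  have hBfold : (PySem.List.enumerate (pre ++ x :: suf) 0).foldl (bStep line)
      ((0 : Int), (0 : Int), (0 : Int))
      = ((k : Int), lastAcc line suf ((k : Int) + 1) (k : Int),
          1 + ((suf.countP (fun b => decide (line ≤ b)) : Int))) := by
    rw [PySem.List.enumerate_append, List.foldl_append,
      bfold_const line pre 0 _ hprefail, PySem.List.enumerate_cons]
    simp only [List.foldl_cons]
    have hstep : bStep line (0, 0, 0) ((0 : Int) + pre.length, x)
        = ((0 : Int) + pre.length, (0 : Int) + pre.length, (0 : Int) + 1) := by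
      simp [bStep, hpx]
    rw [hstep, bfold_pos line suf _ _ _ _ (by omega)]
    rw [Prod.mk.injEq, Prod.mk.injEq]
    refine ⟨?_, ?_, ?_⟩
    · rw [hprelen]; norm_num
    · rw [hprelen]; norm_num
    · push_cast; ring
  have hlen : (((pre ++ x :: suf).length : Int)) = (k : Int) + 1 + (suf.length : Int) := by
    push_cast [List.length_append, List.length_cons, hprelen]
    ring
  cases hsr : suf.reverse.findIdx? (fun b => decide (line ≤ b)) with
  | some k3 =>
      have hfinish : checkFindLoop (pre ++ x :: suf).reverse line
          (((pre ++ x :: suf).length : Int) - 1) (pre ++ x :: suf).reverse = (k3 : Int) := by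
        rw [checkFindLoop_char, hrev, List.findIdx?_append, hsr]
        simp [Option.some_or]
      have hlast : lastAcc line suf ((k : Int) + 1) (k : Int)
          = (k : Int) + 1 + (suf.length : Int) - 1 - (k3 : Int) := by
        rw [lastAcc_rev, hsr]
      simp only [check, check_alt, ← bStep_eq]
      rw [hstart, hfinish, hfull, hcount, hBfold, hlast]
      simp only [List.length_reverse]
      rw [hlen]
      push_cast
      ring
  | none =>
      have hsuffail : ∀ b ∈ suf, ¬ line ≤ b := by
        intro b hb
        have := List.findIdx?_eq_none_iff.mp hsr b (by simpa using hb)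
        simpa using this
      have hsufcount : suf.countP (fun b => decide (line ≤ b)) = 0 := by
        rw [List.countP_eq_zero]
        intro b hb
        simpa using hsuffail b hb
      have hfinish : checkFindLoop (pre ++ x :: suf).reverse line
          (((pre ++ x :: suf).length : Int) - 1) (pre ++ x :: suf).reverse
          = (suf.length : Int) := by
        rw [checkFindLoop_char, hrev, List.findIdx?_append, hsr]
        simp [List.findIdx?_cons, hpx]
      have hlast : lastAcc line suf ((k : Int) + 1) (k : Int) = (k : Int) := by
        rw [lastAcc_const _ _ _ _ hsuffail]
      simp only [check, check_alt, ← bStep_eq]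
      rw [hstart, hfinish, hfull, hcount, hBfold, hlast]
      simp only [List.length_reverse]
      rw [hlen, hsufcount]
      push_cast
      ring

-- ===== VERDICT (by name: the statement is the Claim_ definition above) =====
theorem check_spec : Claim_equal_check := by
  intro buildings line _
  unfold Spec_check
  by_cases hd : AllBelow_check buildings line
  · rw [check_of_D _ _ hd, check_alt_of_D _ _ hd]
  · exact check_eq_alt_of_not_D _ _ hd
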